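-- pv_equiv track=rewrite | github.com/JipengSun/The_Golden_Globes_Mining | Archieves/main.py | gram_cleaning
-- ===== SOURCE A (Python) =====
-- collocation_words = {
--     #"tv":"television",
--     "pic":"picture",
--     "for":"-",
--     "in":"-",
--     'or':'/',
--     'of':'-'
-- }
--
-- skip_words = ['a']
--
-- paraphrase = [',','@','(',')','#']
--
-- def gram_cleaning(grams):
--     new_grams = []
--     for gram in grams:
--         word_list = []
--         for word in gram[0]:
--             if word in collocation_words:
--                 word = collocation_words[word]
--             if word in skip_words:
--                 break
--             if word not in paraphrase:
--                 word_list.append(word)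
--         word_tuple = tuple(word_list)
--         gram_tuple = (word_tuple,gram[1])
--         new_grams.append(gram_tuple)
--     return new_grams
-- ===== SOURCE B (Python) =====
-- collocation_words = {
--     "pic": "picture",
--     "for": "-",
--     "in": "-",
--     'or': '/',
--     'of': '-'
-- }
--
-- skip_words = ['a']
--
-- paraphrase = [',', '@', '(', ')', '#']
--
--
-- def _first_skip_index(words):
--     for i, w in enumerate(words):
--         if w in skip_words:
--             return i
--     return len(words)
--
--
-- def gram_cleaning(grams):
--     result = []
--     for words, tag in grams:
--         mapped = [collocation_words.get(w, w) for w in words]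
--         survivors = mapped[:_first_skip_index(mapped)]
--         result.append((tuple(w for w in survivors if w not in paraphrase), tag))
--     return result
-- ===== Notes on version B (the rewrite author's own statement) =====
-- stated objective: alternative
-- what changed: A's single inner loop with mutation and break is replaced by a three-pass pipeline: map the collocation table over all words, truncate at the first skip word's index, then filter out paraphrase tokens.
import Mathlib
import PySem

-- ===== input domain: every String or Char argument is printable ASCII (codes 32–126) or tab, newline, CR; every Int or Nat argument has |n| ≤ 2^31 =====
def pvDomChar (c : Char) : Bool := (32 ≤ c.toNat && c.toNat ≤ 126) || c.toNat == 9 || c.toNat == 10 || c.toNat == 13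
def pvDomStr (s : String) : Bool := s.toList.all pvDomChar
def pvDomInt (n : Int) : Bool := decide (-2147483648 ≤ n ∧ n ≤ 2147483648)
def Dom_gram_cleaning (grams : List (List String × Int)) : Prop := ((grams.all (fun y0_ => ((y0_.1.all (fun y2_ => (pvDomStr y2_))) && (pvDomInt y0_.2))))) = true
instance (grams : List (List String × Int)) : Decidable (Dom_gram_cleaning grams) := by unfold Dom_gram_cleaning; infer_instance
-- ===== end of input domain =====

-- B replaces A's break-inside-loop with a decomposition into three passes (map the collocation
-- table over all words, cut at the first skip word, filter out paraphrase tokens); objective: alternative.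

-- ===== PORT A =====
-- module-level constants shared by both Pythons
def collocation_words : PySem.Dict String String :=
  PySem.Dict.ofList [("pic", "picture"), ("for", "-"), ("in", "-"), ("or", "/"), ("of", "-")]
def skip_words : List String := ["a"]
def paraphrase : List String := [",", "@", "(", ")", "#"]

-- the inner 'for word in gram[0]' loop with its break, as structural recursion
def gram_cleaning_inner : List String → List String
  | [] => []
  | word :: rest =>
    let w := if collocation_words.contains word then (collocation_words.get? word).getD word else word
    if skip_words.contains w then []
    else if !(paraphrase.contains w) then w :: gram_cleaning_inner rest
    else gram_cleaning_inner rest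

def gram_cleaning (grams : List (List String × Int)) : List (List String × Int) :=
  grams.foldl (fun acc gram => acc ++ [(gram_cleaning_inner gram.1, gram.2)]) []

-- ===== PORT B =====
-- _first_skip_index: index of the first skip word, or the length
def firstSkipIdx : List String → Nat
  | [] => 0
  | w :: ws => if skip_words.contains w then 0 else firstSkipIdx ws + 1

def gram_cleaning_alt (grams : List (List String × Int)) : List (List String × Int) :=
  grams.map (fun g =>
    let mapped := g.1.map (fun w => collocation_words.getD w w)
    let survivors := mapped.take (firstSkipIdx mapped)
    (survivors.filter (fun w => !(paraphrase.contains w)), g.2))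

-- ===== PRECONDITION & SPEC =====
def Spec_gram_cleaning (grams : List (List String × Int)) (out : List (List String × Int)) : Prop := out = gram_cleaning_alt grams
instance (grams : List (List String × Int)) (out : List (List String × Int)) : Decidable (Spec_gram_cleaning grams out) := by unfold Spec_gram_cleaning; infer_instance

-- ===== CLAIM (what is proved, stated in full; the proofs are below) =====
def Claim_equal_gram_cleaning : Prop := ∀ (grams : List (List String × Int)), Dom_gram_cleaning grams → Spec_gram_cleaning grams (gram_cleaning grams)

-- ===== LEMMAS AND PROOFS =====

-- A's 'if word in dict: word = dict[word]' equals B's dict.get(word, word)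
theorem mapWord_eq (w : String) :
    (if collocation_words.contains w then (collocation_words.get? w).getD w else w)
      = collocation_words.getD w w := by
  unfold PySem.Dict.getD
  cases h : collocation_words.get? w with
  | none => simp [(PySem.Dict.get?_eq_none_iff_contains collocation_words w).mp h]
  | some v =>
    have hc : collocation_words.contains w = true := by
      by_contra hc
      simp [← PySem.Dict.get?_eq_none_iff_contains] at hc
      simp [h] at hc
    simp [hc]

-- the inner loop equals B's map-take-filter pipeline
theorem inner_eq (ws : List String) :
    gram_cleaning_inner ws =
      ((ws.map (fun w => collocation_words.getD w w)).take
          (firstSkipIdx (ws.map (fun w => collocation_words.getD w w)))).filter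
        (fun w => !(paraphrase.contains w)) := by
  induction ws with
  | nil => rfl
  | cons word rest ih =>
    simp only [gram_cleaning_inner, List.map_cons, firstSkipIdx, mapWord_eq]
    by_cases hs : collocation_words.getD word word ∈ skip_words
    · simp [hs]
    · by_cases hp : collocation_words.getD word word ∈ paraphrase <;>
        simp [hs, hp, ih]

-- the outer foldl-with-append equals map
theorem foldl_append_map (grams : List (List String × Int)) (acc : List (List String × Int)) :
    grams.foldl (fun acc gram => acc ++ [(gram_cleaning_inner gram.1, gram.2)]) acc
      = acc ++ grams.map (fun g => (gram_cleaning_inner g.1, g.2)) := by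
  induction grams generalizing acc with
  | nil => simp
  | cons g rest ih => simp [List.foldl_cons, ih]

-- ===== VERDICT (by name: the statement is the Claim_ definition above) =====
theorem gram_cleaning_spec : Claim_equal_gram_cleaning := by
  intro grams _
  unfold Spec_gram_cleaning gram_cleaning gram_cleaning_alt
  rw [foldl_append_map]
  simp [inner_eq]
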